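-- pv_equiv track=rewrite | github.com/ErikRospo/BadCodec | main.py | optimal_dimensions
-- ===== SOURCE A (Python) =====
-- import math
--
-- def optimal_dimensions(size: int):
--     #Derivation: SO
--     min_product = float("inf")
--     best_pair = (None, None)
--     start = int(math.isqrt(size))
--     for m in range(start, size + 1):
--         n = (size + m - 1) // m  # ceil(x / m)
--         product = m * n
--         if product < min_product:
--             min_product = product
--             best_pair = (m, n)
--         if (
--             m > size // n
--         ):  # m*n already exceeds x and increasing m further will increase the product
--             break
--
--     return best_pair
-- ===== SOURCE B (Python) =====
-- import math
--
-- def optimal_dimensions(size: int):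
--     # Closed form: the loop's answer is always (isqrt(size), ceil(size/isqrt(size))).
--     s = math.isqrt(size)
--     return (s, (size + s - 1) // s)
-- ===== Notes on version B (the rewrite author's own statement) =====
-- stated objective: simpler
-- what changed: Replaced the iterate-from-isqrt search loop with the closed form (isqrt(size), ceil(size/isqrt(size))), proved equal to the loop's result for all size >= 1; on size <= 0 both raise the same exceptions.
import Mathlib
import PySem

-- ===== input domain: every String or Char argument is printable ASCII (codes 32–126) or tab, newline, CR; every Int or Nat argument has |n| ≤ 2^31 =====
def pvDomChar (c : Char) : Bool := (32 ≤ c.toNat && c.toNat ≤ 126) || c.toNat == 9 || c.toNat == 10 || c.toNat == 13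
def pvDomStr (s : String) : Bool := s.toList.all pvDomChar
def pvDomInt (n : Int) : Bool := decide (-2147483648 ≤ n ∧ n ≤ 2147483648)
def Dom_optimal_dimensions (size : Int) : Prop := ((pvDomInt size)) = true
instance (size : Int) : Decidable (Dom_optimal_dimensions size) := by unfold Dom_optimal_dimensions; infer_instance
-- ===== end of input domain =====

-- B replaces A's iterate-from-isqrt search loop by the closed form (isqrt(size), ceil(size/isqrt(size))),
-- proved equal to the loop's result for every size ≥ 1 (on size ≤ 0 both Pythons raise; excluded by Pre_).

-- ===== PORT A =====
-- the loop 'for m in range(start, size+1)' with early break, as recursion on the loop counter m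
-- (Python's range is lazy, so the port iterates the counter rather than materialising a list);
-- min_product = none encodes float("inf"); best starts as a placeholder (Python's (None,None)):
-- under Pre_ the first iteration always overwrites it.
def pvLoopA (size m : Int) (minp : Option Int) (best : Int × Int) : Int × Int :=
  if h : m < size + 1 then
    let n := PySem.Int.floordiv (size + m - 1) m
    let product := m * n
    let upd : Bool := match minp with
      | none => true               -- product < float("inf")
      | some v => decide (product < v)
    let minp' := if upd then some product else minp
    let best' := if upd then (m, n) else best
    if PySem.Int.floordiv size n < m then best'
    else pvLoopA size (m + 1) minp' best'
  else best
termination_by (size + 1 - m).toNat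
decreasing_by omega

def optimal_dimensions (size : Int) : Int × Int :=
  -- int(math.isqrt(size)): exact for size ≥ 0; math.isqrt raises ValueError for size < 0 (outside Pre_)
  let start : Int := ((Nat.sqrt size.toNat : Nat) : Int)
  pvLoopA size start none (0, 0)

-- ===== PORT B =====
def optimal_dimensions_alt (size : Int) : Int × Int :=
  let s : Int := ((Nat.sqrt size.toNat : Nat) : Int)   -- math.isqrt(size)
  (s, PySem.Int.floordiv (size + s - 1) s)

-- ===== PRECONDITION & SPEC =====
-- Pre_ excludes exactly the inputs on which A raises: size < 0 (ValueError from math.isqrt)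
-- and size = 0 (ZeroDivisionError at m = 0); B raises the same exceptions there.
def Pre_optimal_dimensions (size : Int) : Prop := 1 ≤ size
instance (size : Int) : Decidable (Pre_optimal_dimensions size) := by unfold Pre_optimal_dimensions; infer_instance
def pvWitness_optimal_dimensions : Int := 7

def Spec_optimal_dimensions (size : Int) (out : Int × Int) : Prop := out = optimal_dimensions_alt size
instance (size : Int) (out : Int × Int) : Decidable (Spec_optimal_dimensions size out) := by unfold Spec_optimal_dimensions; infer_instance

-- ===== CLAIM (what is proved, stated in full; the proofs are below) =====
def Claim_equal_optimal_dimensions : Prop := ∀ (size : Int), Dom_optimal_dimensions size → Pre_optimal_dimensions size → Spec_optimal_dimensions size (optimal_dimensions size)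

-- ===== LEMMAS AND PROOFS =====

-- ceil(size/m) * m ≥ size for m > 0 (n = (size + m - 1) // m)
theorem pvCeilGe (size m : Int) (hm : 0 < m) :
    size ≤ m * PySem.Int.floordiv (size + m - 1) m := by
  have heq := PySem.Int.floordiv_mul_add_mod (size + m - 1) m
  have h0 := PySem.Int.mod_nonneg (size + m - 1) hm
  have h1 := PySem.Int.mod_lt (size + m - 1) hm
  have : m * PySem.Int.floordiv (size + m - 1) m
       = PySem.Int.floordiv (size + m - 1) m * m := mul_comm _ _
  rw [this]
  linarith

-- once min_product ≤ size, no later iteration (m > 0) updates the state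
theorem pvLoopFrozen (size v : Int) (best : Int × Int) (hv : v ≤ size) :
    ∀ k m, (size + 1 - m).toNat ≤ k → 0 < m → pvLoopA size m (some v) best = best := by
  intro k
  induction k with
  | zero =>
      intro m hk hm
      rw [pvLoopA]
      have : ¬ (m < size + 1) := by omega
      simp [this]
  | succ k ih =>
      intro m hk hm
      rw [pvLoopA]
      by_cases hlt : m < size + 1
      · have hge : size ≤ m * PySem.Int.floordiv (size + m - 1) m := pvCeilGe size m hm
        have hnot : ¬ (m * PySem.Int.floordiv (size + m - 1) m < v) := by linarith
        simp only [hlt, dif_pos, hnot, decide_false]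
        split
        · rfl
        · exact ih (m + 1) (by omega) (by omega)
      · simp [hlt]

theorem optimal_dimensions_eq_closed (size : Int) (h1 : 1 ≤ size) :
    optimal_dimensions size = optimal_dimensions_alt size := by
  set s : Int := ((Nat.sqrt size.toNat : Nat) : Int) with hs
  have hs1 : 1 ≤ s := by
    have : 0 < Nat.sqrt size.toNat := Nat.sqrt_pos.mpr (by omega)
    omega
  have hsle : s ≤ size := by
    have := Nat.sqrt_le_self size.toNat
    omega
  set c : Int := PySem.Int.floordiv (size + s - 1) s with hc
  have hc1 : 1 ≤ c := by
    rw [hc]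
    exact (PySem.Int.le_floordiv_iff_mul_le (by omega)).mpr (by linarith)
  show pvLoopA size s none (0, 0) = (s, c)
  rw [pvLoopA]
  have hlt : s < size + 1 := by omega
  simp only [hlt, dif_pos, if_true, ← hc]
  split
  · rfl
  · -- no break: s ≤ size // c, hence (as c > 0) s * c ≤ size; the rest of the loop never updates
    rename_i hbreak
    have hle : s ≤ PySem.Int.floordiv size c := by omega
    have hsc : s * c ≤ size :=
      (PySem.Int.le_floordiv_iff_mul_le (by omega)).mp hle
    exact pvLoopFrozen size (s * c) (s, c) hsc _ (s + 1) le_rfl (by omega)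

-- ===== VERDICT (by name: the statement is the Claim_ definition above) =====
theorem optimal_dimensions_spec : Claim_equal_optimal_dimensions := by
  intro size _ hpre
  exact optimal_dimensions_eq_closed size hpre
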